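-- pv_equiv track=rewrite | github.com/pengra/wxml | rakan/supers.py | get_boarders
-- ===== SOURCE A (Python) =====
-- def get_boarders(possible_moves, adj_graph, groups):
--     boarders = {}
--     for m in possible_moves:
--         b = 0
--         for p in adj_graph[m[0]]:
--             if groups[p] != m[1]:
--                 b += 1
--         boarders[m[0]] = b
--     return boarders
-- ===== SOURCE B (Python) =====
-- def get_boarders(possible_moves, adj_graph, groups):
--     # Build, once per distinct moved node, its degree and a tally of its
--     # neighbors' groups; each move's answer is then degree - same-group tally.
--     index = {}
--     for node in dict.fromkeys(m[0] for m in possible_moves):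
--         nbrs = adj_graph[node]
--         counts = {}
--         for p in nbrs:
--             g = groups[p]
--             counts[g] = counts.get(g, 0) + 1
--         index[node] = (len(nbrs), counts)
--     boarders = {}
--     for node, grp in possible_moves:
--         deg, counts = index[node]
--         boarders[node] = deg - counts.get(grp, 0)
--     return boarders
-- ===== Notes on version B (the rewrite author's own statement) =====
-- stated objective: alternative
-- what changed: Instead of re-scanning a node's adjacency list for every move, B builds once per distinct node an index (degree, Counter of neighbors' groups) and answers each move as degree minus the same-group tally.
import Mathlib
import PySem

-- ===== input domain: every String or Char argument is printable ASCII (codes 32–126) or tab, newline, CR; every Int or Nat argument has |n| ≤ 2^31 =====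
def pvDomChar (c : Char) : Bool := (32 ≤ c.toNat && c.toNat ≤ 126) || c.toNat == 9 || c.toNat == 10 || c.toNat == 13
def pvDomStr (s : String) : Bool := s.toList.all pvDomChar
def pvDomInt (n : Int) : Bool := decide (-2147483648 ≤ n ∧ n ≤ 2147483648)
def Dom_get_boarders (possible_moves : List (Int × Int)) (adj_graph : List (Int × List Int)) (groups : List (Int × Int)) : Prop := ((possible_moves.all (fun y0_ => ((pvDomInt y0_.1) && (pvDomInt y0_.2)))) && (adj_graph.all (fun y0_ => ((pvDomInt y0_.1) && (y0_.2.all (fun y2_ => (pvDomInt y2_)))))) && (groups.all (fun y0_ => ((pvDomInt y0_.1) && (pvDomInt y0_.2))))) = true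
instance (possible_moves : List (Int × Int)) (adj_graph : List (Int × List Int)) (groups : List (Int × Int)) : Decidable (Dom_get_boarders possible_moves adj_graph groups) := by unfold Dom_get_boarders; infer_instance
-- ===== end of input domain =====

-- B replaces A's per-move rescans by a per-node index of (degree, neighbor-group counter); equality of return values is proved on Pre_ (where A raises no KeyError).

-- ===== PORT A =====
-- Python dict subscripts adj_graph[m[0]] / groups[p] may raise KeyError: the port
-- threads Option (none = KeyError) and unwraps at the end; Pre_ excludes the none case.
def pvInnerA (grpD : PySem.Dict Int Int) (g : Int) (nbrs : List Int) : Option Int :=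
  nbrs.foldl (fun ob p => ob.bind (fun b =>
    (grpD.get? p).map (fun gp => if gp ≠ g then b + 1 else b))) (some 0)

def pvLoopA (adjD : PySem.Dict Int (List Int)) (grpD : PySem.Dict Int Int)
    (pm : List (Int × Int)) : Option (PySem.Dict Int Int) :=
  pm.foldl (fun od m => od.bind (fun d =>
    (adjD.get? m.1).bind (fun nbrs =>
      (pvInnerA grpD m.2 nbrs).map (fun b => d.insert m.1 b)))) (some PySem.Dict.empty)

def get_boarders (possible_moves : List (Int × Int)) (adj_graph : List (Int × List Int)) (groups : List (Int × Int)) : List (Int × Int) :=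
  ((pvLoopA (PySem.Dict.ofList adj_graph) (PySem.Dict.ofList groups) possible_moves).getD PySem.Dict.empty).items

-- ===== PORT B =====
-- counts[g] = counts.get(g, 0) + 1 over the neighbor list
def pvCountB (grpD : PySem.Dict Int Int) (nbrs : List Int) : Option (PySem.Dict Int Int) :=
  nbrs.foldl (fun oc p => oc.bind (fun c =>
    (grpD.get? p).map (fun g => c.insert g (c.getD g 0 + 1)))) (some PySem.Dict.empty)

-- index[node] = (len(adj_graph[node]), counts) over the deduplicated move sources
def pvIndexB (adjD : PySem.Dict Int (List Int)) (grpD : PySem.Dict Int Int)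
    (nodes : List Int) : Option (PySem.Dict Int (Int × PySem.Dict Int Int)) :=
  nodes.foldl (fun oi node => oi.bind (fun i =>
    (adjD.get? node).bind (fun nbrs =>
      (pvCountB grpD nbrs).map (fun c => i.insert node ((nbrs.length : Int), c))))) (some PySem.Dict.empty)

-- boarders[node] = deg - counts.get(grp, 0)
def pvLoopB (idx : PySem.Dict Int (Int × PySem.Dict Int Int))
    (pm : List (Int × Int)) : Option (PySem.Dict Int Int) :=
  pm.foldl (fun od m => od.bind (fun d =>
    (idx.get? m.1).map (fun dc => d.insert m.1 (dc.1 - dc.2.getD m.2 0)))) (some PySem.Dict.empty)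

def get_boarders_alt (possible_moves : List (Int × Int)) (adj_graph : List (Int × List Int)) (groups : List (Int × Int)) : List (Int × Int) :=
  (((pvIndexB (PySem.Dict.ofList adj_graph) (PySem.Dict.ofList groups)
      (PySem.List.dedup (possible_moves.map Prod.fst))).bind
    (fun idx => pvLoopB idx possible_moves)).getD PySem.Dict.empty).items

-- ===== PRECONDITION & SPEC =====
-- Pre_ excludes exactly the inputs on which Python A raises KeyError: some move's
-- source node is missing from adj_graph, or one of its neighbors is missing from groups.
def Pre_get_boarders (possible_moves : List (Int × Int)) (adj_graph : List (Int × List Int)) (groups : List (Int × Int)) : Prop :=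
  possible_moves.all (fun m =>
    match (PySem.Dict.ofList adj_graph).get? m.1 with
    | some nbrs => nbrs.all (fun p => (PySem.Dict.ofList groups).contains p)
    | none => false) = true
instance (possible_moves : List (Int × Int)) (adj_graph : List (Int × List Int)) (groups : List (Int × Int)) : Decidable (Pre_get_boarders possible_moves adj_graph groups) := by unfold Pre_get_boarders; infer_instance

def pvWitness_get_boarders : (List (Int × Int)) × (List (Int × List Int)) × (List (Int × Int)) :=
  ([(1, 0), (2, 1), (1, 1)], [(1, [2, 3]), (2, [1]), (3, [1, 2])], [(1, 0), (2, 1), (3, 0)])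

def Spec_get_boarders (possible_moves : List (Int × Int)) (adj_graph : List (Int × List Int)) (groups : List (Int × Int)) (out : List (Int × Int)) : Prop := out = get_boarders_alt possible_moves adj_graph groups
instance (possible_moves : List (Int × Int)) (adj_graph : List (Int × List Int)) (groups : List (Int × Int)) (out : List (Int × Int)) : Decidable (Spec_get_boarders possible_moves adj_graph groups out) := by unfold Spec_get_boarders; infer_instance

-- ===== CLAIM (what is proved, stated in full; the proofs are below) =====
def Claim_equal_get_boarders : Prop := ∀ (possible_moves : List (Int × Int)) (adj_graph : List (Int × List Int)) (groups : List (Int × Int)), Dom_get_boarders possible_moves adj_graph groups → Pre_get_boarders possible_moves adj_graph groups → Spec_get_boarders possible_moves adj_graph groups (get_boarders possible_moves adj_graph groups)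

-- ===== LEMMAS AND PROOFS =====

-- the common per-move value: degree minus same-group neighbor count
def pvVal (adjD : PySem.Dict Int (List Int)) (grpD : PySem.Dict Int Int) (m : Int × Int) : Int :=
  match adjD.get? m.1 with
  | some nbrs => (nbrs.length : Int) - ((nbrs.map (fun p => grpD.getD p 0)).count m.2 : Int)
  | none => 0

theorem pv_get?_some_of_contains (grpD : PySem.Dict Int Int) (p : Int)
    (hc : grpD.contains p = true) : grpD.get? p = some (grpD.getD p 0) := by
  cases hg : grpD.get? p with
  | none => rw [PySem.Dict.get?_eq_none_iff_contains] at hg; rw [hg] at hc; cases hc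
  | some v => rw [PySem.Dict.getD_of_get?_eq_some grpD 0 hg]

theorem pvInnerA_aux (grpD : PySem.Dict Int Int) (g : Int) :
    ∀ (nbrs : List Int) (b : Int), (∀ p ∈ nbrs, grpD.contains p = true) →
      nbrs.foldl (fun ob p => ob.bind (fun b =>
        (grpD.get? p).map (fun gp => if gp ≠ g then b + 1 else b))) (some b)
      = some (b + (nbrs.length : Int) - ((nbrs.map (fun p => grpD.getD p 0)).count g : Int))
  | [], b, _ => by simp
  | p :: rest, b, h => by
    have hg := pv_get?_some_of_contains grpD p (h p (List.mem_cons_self ..))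
    have ih := pvInnerA_aux grpD g rest (if grpD.getD p 0 ≠ g then b + 1 else b)
      (fun q hq => h q (List.mem_cons_of_mem _ hq))
    simp only [List.foldl_cons, Option.bind_some, hg, Option.map_some] at ih ⊢
    rw [ih]
    congr 1
    simp only [List.map_cons, List.count_cons, List.length_cons]
    push_cast
    split_ifs with h1 h2 h2 <;> simp_all <;> omega

theorem pvInnerA_eq (grpD : PySem.Dict Int Int) (g : Int) (nbrs : List Int)
    (h : ∀ p ∈ nbrs, grpD.contains p = true) :
    pvInnerA grpD g nbrs =
      some ((nbrs.length : Int) - ((nbrs.map (fun p => grpD.getD p 0)).count g : Int)) := by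
  have := pvInnerA_aux grpD g nbrs 0 h
  simpa [pvInnerA] using this

theorem pvCountB_aux (grpD : PySem.Dict Int Int) :
    ∀ (nbrs : List Int) (c : PySem.Dict Int Int), (∀ p ∈ nbrs, grpD.contains p = true) →
      nbrs.foldl (fun oc p => oc.bind (fun c =>
        (grpD.get? p).map (fun g => c.insert g (c.getD g 0 + 1)))) (some c)
      = some ((nbrs.map (fun p => grpD.getD p 0)).foldl (fun c g => c.insert g (c.getD g 0 + 1)) c)
  | [], c, _ => by simp
  | p :: rest, c, h => by
    have hg := pv_get?_some_of_contains grpD p (h p (List.mem_cons_self ..))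
    simp only [List.foldl_cons, Option.bind_some, hg, Option.map_some, List.map_cons]
    exact pvCountB_aux grpD rest _ (fun q hq => h q (List.mem_cons_of_mem _ hq))

theorem pvCountB_eq (grpD : PySem.Dict Int Int) (nbrs : List Int)
    (h : ∀ p ∈ nbrs, grpD.contains p = true) :
    pvCountB grpD nbrs = some (PySem.Dict.counter (nbrs.map (fun p => grpD.getD p 0))) := by
  rw [pvCountB, pvCountB_aux grpD nbrs PySem.Dict.empty h,
      PySem.Dict.foldl_insert_getD_add_one_eq_counter]

theorem pvLoopA_aux (adjD : PySem.Dict Int (List Int)) (grpD : PySem.Dict Int Int) :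
    ∀ (pm : List (Int × Int)) (d : PySem.Dict Int Int),
      (∀ m ∈ pm, ∃ nbrs, adjD.get? m.1 = some nbrs ∧ ∀ p ∈ nbrs, grpD.contains p = true) →
      pm.foldl (fun od m => od.bind (fun d =>
        (adjD.get? m.1).bind (fun nbrs =>
          (pvInnerA grpD m.2 nbrs).map (fun b => d.insert m.1 b)))) (some d)
      = some (pm.foldl (fun d m => d.insert m.1 (pvVal adjD grpD m)) d)
  | [], d, _ => by simp
  | m :: rest, d, h => by
    obtain ⟨nbrs, hn, hcont⟩ := h m (List.mem_cons_self ..)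
    simp only [List.foldl_cons, Option.bind_some, hn, pvInnerA_eq grpD m.2 nbrs hcont,
      Option.bind_some, Option.map_some]
    rw [pvLoopA_aux adjD grpD rest _ (fun q hq => h q (List.mem_cons_of_mem _ hq))]
    congr 2
    simp [pvVal, hn]

theorem pvLoopA_eq (adjD : PySem.Dict Int (List Int)) (grpD : PySem.Dict Int Int)
    (pm : List (Int × Int))
    (h : ∀ m ∈ pm, ∃ nbrs, adjD.get? m.1 = some nbrs ∧ ∀ p ∈ nbrs, grpD.contains p = true) :
    pvLoopA adjD grpD pm = some (pm.foldl (fun d m => d.insert m.1 (pvVal adjD grpD m)) PySem.Dict.empty) :=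
  pvLoopA_aux adjD grpD pm PySem.Dict.empty h

-- index entry for one node
def pvEntry (adjD : PySem.Dict Int (List Int)) (grpD : PySem.Dict Int Int) (n : Int) :
    Int × PySem.Dict Int Int :=
  match adjD.get? n with
  | some nbrs => ((nbrs.length : Int), PySem.Dict.counter (nbrs.map (fun p => grpD.getD p 0)))
  | none => (0, PySem.Dict.empty)

theorem pv_get?_foldl_insert_of_not_mem {ν : Type} (F : Int → ν) :
    ∀ (nodes : List Int) (i : PySem.Dict Int ν) (n : Int), n ∉ nodes →
      (nodes.foldl (fun i x => i.insert x (F x)) i).get? n = i.get? n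
  | [], _, _, _ => rfl
  | x :: rest, i, n, h => by
    simp only [List.foldl_cons]
    rw [pv_get?_foldl_insert_of_not_mem F rest _ n (fun hr => h (List.mem_cons_of_mem _ hr))]
    exact PySem.Dict.get?_insert_of_ne i (F x)
      (fun he : n = x => h (he ▸ List.mem_cons_self ..))

theorem pv_get?_foldl_insert_of_mem {ν : Type} (F : Int → ν) :
    ∀ (nodes : List Int) (i : PySem.Dict Int ν) (n : Int), n ∈ nodes →
      (nodes.foldl (fun i x => i.insert x (F x)) i).get? n = some (F n)
  | [], _, _, h => absurd h (List.not_mem_nil)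
  | x :: rest, i, n, h => by
    simp only [List.foldl_cons]
    by_cases hr : n ∈ rest
    · exact pv_get?_foldl_insert_of_mem F rest _ n hr
    · have hx : n = x := (List.mem_cons.mp h).resolve_right hr
      subst hx
      rw [pv_get?_foldl_insert_of_not_mem F rest _ n hr, PySem.Dict.get?_insert_self]

theorem pvIndexB_aux (adjD : PySem.Dict Int (List Int)) (grpD : PySem.Dict Int Int) :
    ∀ (nodes : List Int) (i : PySem.Dict Int (Int × PySem.Dict Int Int)),
      (∀ n ∈ nodes, ∃ nbrs, adjD.get? n = some nbrs ∧ ∀ p ∈ nbrs, grpD.contains p = true) →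
      nodes.foldl (fun oi node => oi.bind (fun i =>
        (adjD.get? node).bind (fun nbrs =>
          (pvCountB grpD nbrs).map (fun c => i.insert node ((nbrs.length : Int), c))))) (some i)
      = some (nodes.foldl (fun i n => i.insert n (pvEntry adjD grpD n)) i)
  | [], _, _ => by simp
  | x :: rest, i, h => by
    obtain ⟨nbrs, hn, hcont⟩ := h x (List.mem_cons_self ..)
    simp only [List.foldl_cons, Option.bind_some, hn, pvCountB_eq grpD nbrs hcont,
      Option.bind_some, Option.map_some]
    rw [pvIndexB_aux adjD grpD rest _ (fun q hq => h q (List.mem_cons_of_mem _ hq))]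
    congr 2
    simp [pvEntry, hn]

theorem pvIndexB_get? (adjD : PySem.Dict Int (List Int)) (grpD : PySem.Dict Int Int)
    (nodes : List Int)
    (h : ∀ n ∈ nodes, ∃ nbrs, adjD.get? n = some nbrs ∧ ∀ p ∈ nbrs, grpD.contains p = true) :
    ∃ idx, pvIndexB adjD grpD nodes = some idx ∧
      ∀ n ∈ nodes, ∃ nbrs, adjD.get? n = some nbrs ∧
        idx.get? n = some ((nbrs.length : Int), PySem.Dict.counter (nbrs.map (fun p => grpD.getD p 0))) := by
  refine ⟨_, pvIndexB_aux adjD grpD nodes PySem.Dict.empty h, ?_⟩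
  intro n hn
  obtain ⟨nbrs, hg, _⟩ := h n hn
  refine ⟨nbrs, hg, ?_⟩
  rw [pv_get?_foldl_insert_of_mem (pvEntry adjD grpD) nodes PySem.Dict.empty n hn]
  simp [pvEntry, hg]

theorem pvLoopB_aux (adjD : PySem.Dict Int (List Int)) (grpD : PySem.Dict Int Int)
    (idx : PySem.Dict Int (Int × PySem.Dict Int Int)) :
    ∀ (pm : List (Int × Int)) (d : PySem.Dict Int Int),
      (∀ m ∈ pm, ∃ nbrs, adjD.get? m.1 = some nbrs ∧
        idx.get? m.1 = some ((nbrs.length : Int), PySem.Dict.counter (nbrs.map (fun p => grpD.getD p 0)))) →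
      pm.foldl (fun od m => od.bind (fun d =>
        (idx.get? m.1).map (fun dc => d.insert m.1 (dc.1 - dc.2.getD m.2 0)))) (some d)
      = some (pm.foldl (fun d m => d.insert m.1 (pvVal adjD grpD m)) d)
  | [], _, _ => by simp
  | m :: rest, d, h => by
    obtain ⟨nbrs, hn, hi⟩ := h m (List.mem_cons_self ..)
    simp only [List.foldl_cons, Option.bind_some, hi, Option.map_some]
    rw [pvLoopB_aux adjD grpD idx rest _ (fun q hq => h q (List.mem_cons_of_mem _ hq))]
    congr 2
    simp [pvVal, hn, PySem.Dict.getD_counter]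

theorem pvLoopB_eq (adjD : PySem.Dict Int (List Int)) (grpD : PySem.Dict Int Int)
    (idx : PySem.Dict Int (Int × PySem.Dict Int Int)) (pm : List (Int × Int))
    (h : ∀ m ∈ pm, ∃ nbrs, adjD.get? m.1 = some nbrs ∧
        idx.get? m.1 = some ((nbrs.length : Int), PySem.Dict.counter (nbrs.map (fun p => grpD.getD p 0)))) :
    pvLoopB idx pm = some (pm.foldl (fun d m => d.insert m.1 (pvVal adjD grpD m)) PySem.Dict.empty) :=
  pvLoopB_aux adjD grpD idx pm PySem.Dict.empty h

-- ===== VERDICT (by name: the statement is the Claim_ definition above) =====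
theorem get_boarders_spec : Claim_equal_get_boarders := by
  intro pm adj groups _ hpre
  unfold Spec_get_boarders get_boarders get_boarders_alt
  have hall : ∀ m ∈ pm, ∃ nbrs, (PySem.Dict.ofList adj).get? m.1 = some nbrs ∧
      ∀ p ∈ nbrs, (PySem.Dict.ofList groups).contains p = true := by
    intro m hm
    have := (List.all_eq_true.mp hpre) m hm
    cases hg : (PySem.Dict.ofList adj).get? m.1 with
    | none => simp [hg] at this
    | some nbrs =>
      refine ⟨nbrs, rfl, ?_⟩
      rw [hg] at this
      simpa [List.all_eq_true] using this
  have hnodes : ∀ n ∈ PySem.List.dedup (pm.map Prod.fst), ∃ nbrs,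
      (PySem.Dict.ofList adj).get? n = some nbrs ∧
      ∀ p ∈ nbrs, (PySem.Dict.ofList groups).contains p = true := by
    intro n hn
    rw [PySem.List.mem_dedup] at hn
    obtain ⟨m, hm, hm1⟩ := List.mem_map.mp hn
    exact hm1 ▸ hall m hm
  obtain ⟨idx, hidx, hget⟩ := pvIndexB_get? _ _ _ hnodes
  rw [pvLoopA_eq _ _ _ hall, hidx, Option.bind_some,
      pvLoopB_eq (PySem.Dict.ofList adj) (PySem.Dict.ofList groups) idx pm ?_]
  intro m hm
  exact hget m.1 (by rw [PySem.List.mem_dedup]; exact List.mem_map.mpr ⟨m, hm, rfl⟩)
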